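-- pv_equiv track=rewrite | github.com/xd-ai/sweeft-2 | exercise3.py | detonate
-- ===== SOURCE A (Python) =====
-- def detonate(r, c, grid):
--     detonated_grid = [['O'] * c for i in range(r)]
--     for i in range(r):
--         for j in range(c):
--             if grid[i][j] == 'O':
--                 detonated_grid[i][j] = '.'
--                 if i + 1 <= r - 1:
--                     detonated_grid[i + 1][j] = '.'
--                 if i - 1 >= 0:
--                     detonated_grid[i - 1][j] = '.'
--                 if j + 1 <= c - 1:
--                     detonated_grid[i][j + 1] = '.'
--                 if j - 1 >= 0:
--                     detonated_grid[i][j - 1] = '.'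
--     return detonated_grid
-- ===== SOURCE B (Python) =====
-- def detonate(r, c, grid):
--     def bomb(i, j):
--         return 0 <= i < r and 0 <= j < c and grid[i][j] == 'O'
--     return [['.' if bomb(i, j) or bomb(i - 1, j) or bomb(i + 1, j)
--              or bomb(i, j - 1) or bomb(i, j + 1) else 'O'
--              for j in range(c)] for i in range(r)]
-- ===== Notes on version B (the rewrite author's own statement) =====
-- stated objective: simpler
-- what changed: Gather instead of scatter: B computes each output cell directly from grid[i][j] and its in-bounds orthogonal neighbors in one comprehension, with no pre-initialized grid and no neighbor writes.
import Mathlib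
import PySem

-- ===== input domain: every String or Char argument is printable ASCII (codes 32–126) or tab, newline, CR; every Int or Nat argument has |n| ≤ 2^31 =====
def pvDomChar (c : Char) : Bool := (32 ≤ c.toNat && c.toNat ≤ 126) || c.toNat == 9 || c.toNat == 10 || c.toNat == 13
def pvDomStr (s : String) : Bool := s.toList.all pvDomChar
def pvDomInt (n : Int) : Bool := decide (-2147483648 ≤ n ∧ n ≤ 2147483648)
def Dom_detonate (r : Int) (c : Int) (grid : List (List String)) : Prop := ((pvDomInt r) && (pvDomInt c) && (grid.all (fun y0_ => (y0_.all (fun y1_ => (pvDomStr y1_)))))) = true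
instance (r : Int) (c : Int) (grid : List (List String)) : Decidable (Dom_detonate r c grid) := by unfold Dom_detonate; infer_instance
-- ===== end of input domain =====

-- B swaps A's scatter (pre-filled grid plus neighbor writes) for a gather that computes
-- each cell directly from its in-bounds orthogonal neighbors (objective: simpler).

-- ===== PORT A =====
-- detonated_grid[i][j] = v  (indices are nonnegative and in range wherever A writes)
def pvStore (g : List (List String)) (i j : Int) (v : String) : List (List String) :=
  PySem.List.pySetD g i (PySem.List.pySetD (PySem.List.pyGetD g i []) j v)

def detonate (r : Int) (c : Int) (grid : List (List String)) : List (List String) :=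
  -- detonated_grid = [['O'] * c for i in range(r)]
  let init := (PySem.List.pyRange 0 r 1).map (fun _ => List.replicate c.toNat "O")
  (PySem.List.pyRange 0 r 1).foldl (fun dg i =>
    (PySem.List.pyRange 0 c 1).foldl (fun dg j =>
      -- grid[i][j] == 'O'  (in range under Pre_detonate; Python raises outside it)
      if PySem.List.pyGetD (PySem.List.pyGetD grid i []) j "" == "O" then
        let dg1 := pvStore dg i j "."
        let dg2 := if i + 1 ≤ r - 1 then pvStore dg1 (i + 1) j "." else dg1
        let dg3 := if i - 1 ≥ 0 then pvStore dg2 (i - 1) j "." else dg2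
        let dg4 := if j + 1 ≤ c - 1 then pvStore dg3 i (j + 1) "." else dg3
        if j - 1 ≥ 0 then pvStore dg4 i (j - 1) "." else dg4
      else dg) dg) init

-- ===== PORT B =====
-- bomb(i, j): 0 <= i < r and 0 <= j < c and grid[i][j] == 'O'
def pvBomb (r c : Int) (grid : List (List String)) (i j : Int) : Bool :=
  decide (0 ≤ i) && decide (i < r) && decide (0 ≤ j) && decide (j < c) &&
    (PySem.List.pyGetD (PySem.List.pyGetD grid i []) j "" == "O")

def detonate_alt (r : Int) (c : Int) (grid : List (List String)) : List (List String) :=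
  (PySem.List.pyRange 0 r 1).map (fun i =>
    (PySem.List.pyRange 0 c 1).map (fun j =>
      if pvBomb r c grid i j || pvBomb r c grid (i - 1) j || pvBomb r c grid (i + 1) j
          || pvBomb r c grid i (j - 1) || pvBomb r c grid i (j + 1) then "." else "O"))

-- ===== PRECONDITION & SPEC =====
-- Pre_ excludes exactly the inputs where Python A raises IndexError: grids with fewer
-- than r rows, or one of the first r rows shorter than c.
def Pre_detonate (r : Int) (c : Int) (grid : List (List String)) : Prop :=
  0 < r → 0 < c → r.toNat ≤ grid.length ∧ ∀ row ∈ grid.take r.toNat, c.toNat ≤ row.length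
instance (r : Int) (c : Int) (grid : List (List String)) : Decidable (Pre_detonate r c grid) := by
  unfold Pre_detonate; infer_instance

def pvWitness_detonate : Int × Int × List (List String) :=
  (2, 2, [["O", "."], [".", "."]])

def Spec_detonate (r : Int) (c : Int) (grid : List (List String)) (out : List (List String)) : Prop := out = detonate_alt r c grid
instance (r : Int) (c : Int) (grid : List (List String)) (out : List (List String)) : Decidable (Spec_detonate r c grid out) := by unfold Spec_detonate; infer_instance

-- ===== CLAIM (what is proved, stated in full; the proofs are below) =====
def Claim_equal_detonate : Prop := ∀ (r : Int) (c : Int) (grid : List (List String)), Dom_detonate r c grid → Pre_detonate r c grid → Spec_detonate r c grid (detonate r c grid)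

-- ===== LEMMAS AND PROOFS =====

-- Nat-coordinate view of a grid, of bombs and of adjacency (incl. the cell itself)
def gcell (g : List (List String)) (i j : Nat) : String := (g.getD i []).getD j ""

def bombN (grid : List (List String)) (a b : Nat) : Bool := gcell grid a b == "O"

def pvAdj (a b i j : Nat) : Bool :=
  (a == i && b == j) || (a + 1 == i && b == j) || (i + 1 == a && b == j)
    || (a == i && b + 1 == j) || (a == i && j + 1 == b)

def Shape (R C : Nat) (g : List (List String)) : Prop :=
  g.length = R ∧ ∀ row ∈ g, row.length = C

-- the body of A's inner loop, split into its five guarded writes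
def pvW1 (dg : List (List String)) (p : Int × Int) : List (List String) :=
  pvStore dg p.1 p.2 "."
def pvW2 (r : Int) (dg : List (List String)) (p : Int × Int) : List (List String) :=
  if p.1 + 1 ≤ r - 1 then pvStore dg (p.1 + 1) p.2 "." else dg
def pvW3 (dg : List (List String)) (p : Int × Int) : List (List String) :=
  if p.1 - 1 ≥ 0 then pvStore dg (p.1 - 1) p.2 "." else dg
def pvW4 (c : Int) (dg : List (List String)) (p : Int × Int) : List (List String) :=
  if p.2 + 1 ≤ c - 1 then pvStore dg p.1 (p.2 + 1) "." else dg
def pvW5 (dg : List (List String)) (p : Int × Int) : List (List String) :=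
  if p.2 - 1 ≥ 0 then pvStore dg p.1 (p.2 - 1) "." else dg

def stepA (r c : Int) (grid : List (List String)) (dg : List (List String)) (p : Int × Int) :
    List (List String) :=
  if PySem.List.pyGetD (PySem.List.pyGetD grid p.1 []) p.2 "" == "O" then
    pvW5 (pvW4 c (pvW3 (pvW2 r (pvW1 dg p) p) p) p) p
  else dg

def pvPairs (r c : Int) : List (Int × Int) :=
  (PySem.List.pyRange 0 r 1).flatMap (fun i => (PySem.List.pyRange 0 c 1).map (fun j => (i, j)))

def hitL (grid : List (List String)) (L : List (Int × Int)) (i j : Nat) : Bool :=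
  L.any (fun p => bombN grid p.1.toNat p.2.toNat && pvAdj p.1.toNat p.2.toNat i j)

theorem pyGetD_nonneg' {α : Type} (xs : List α) (i : Int) (d : α) (h : 0 ≤ i) :
    PySem.List.pyGetD xs i d = xs.getD i.toNat d := by
  have hi : i = ((i.toNat : Nat) : Int) := by omega
  conv_lhs => rw [hi, PySem.List.pyGetD_natCast]

theorem gcell_pyGetD (grid : List (List String)) (i j : Int) (hi : 0 ≤ i) (hj : 0 ≤ j) :
    PySem.List.pyGetD (PySem.List.pyGetD grid i []) j "" = gcell grid i.toNat j.toNat := by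
  rw [pyGetD_nonneg' _ _ _ hi, pyGetD_nonneg' _ _ _ hj]; rfl

theorem pvStore_eq (g : List (List String)) (a b : Int) (v : String)
    (ha : 0 ≤ a) (hb : 0 ≤ b) :
    pvStore g a b v = g.set a.toNat ((g.getD a.toNat []).set b.toNat v) := by
  unfold pvStore
  rw [PySem.List.pySetD_of_nonneg _ _ ha, PySem.List.pySetD_of_nonneg _ _ hb,
    pyGetD_nonneg' _ _ _ ha]

theorem shape_store {R C : Nat} {g : List (List String)} (hs : Shape R C g)
    (a b : Int) (v : String) (ha : 0 ≤ a) (hb : 0 ≤ b) :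
    Shape R C (pvStore g a b v) := by
  obtain ⟨hlen, hrow⟩ := hs
  rw [pvStore_eq g a b v ha hb]
  refine ⟨by simpa using hlen, ?_⟩
  intro row hmem
  by_cases hin : a.toNat < g.length
  · rcases List.mem_or_eq_of_mem_set hmem with h | h
    · exact hrow _ h
    · subst h
      rw [List.length_set, List.getD_eq_getElem g [] hin]
      exact hrow _ (g.getElem_mem hin)
  · rw [List.set_eq_of_length_le (by omega)] at hmem
    exact hrow _ hmem

theorem gcell_store {R C : Nat} {g : List (List String)} (hs : Shape R C g)
    (a b : Int) (v : String) (ha : 0 ≤ a) (hb : 0 ≤ b)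
    (i j : Nat) (hi : i < R) (hj : j < C) :
    gcell (pvStore g a b v) i j =
      if a.toNat = i ∧ b.toNat = j then v else gcell g i j := by
  obtain ⟨hlen, hrow⟩ := hs
  rw [pvStore_eq g a b v ha hb]
  simp only [gcell, List.getD_eq_getElem?_getD]
  by_cases hA : a.toNat = i
  · subst hA
    have hiL : a.toNat < g.length := by omega
    rw [List.getElem?_set_self hiL, Option.getD_some]
    have hrowv : g[a.toNat]?.getD ([] : List String) = g[a.toNat] := by
      rw [List.getElem?_eq_getElem hiL]; rfl
    have hrowlen : (g[a.toNat]?.getD ([] : List String)).length = C := by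
      rw [hrowv]; exact hrow _ (g.getElem_mem hiL)
    by_cases hB : b.toNat = j
    · subst hB
      rw [if_pos ⟨rfl, rfl⟩, List.getElem?_set_self (by omega), Option.getD_some]
    · rw [if_neg (by tauto), List.getElem?_set_ne hB]
  · rw [if_neg (by tauto), List.getElem?_set_ne hA]

theorem shape_w1 {R C : Nat} {dg : List (List String)} {p : Int × Int}
    (hs : Shape R C dg) (h1 : 0 ≤ p.1) (h3 : 0 ≤ p.2) : Shape R C (pvW1 dg p) :=
  shape_store hs p.1 p.2 "." h1 h3

theorem shape_w2 {R C : Nat} {r : Int} {dg : List (List String)} {p : Int × Int}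
    (hs : Shape R C dg) (h1 : 0 ≤ p.1) (h3 : 0 ≤ p.2) : Shape R C (pvW2 r dg p) := by
  unfold pvW2; split
  · exact shape_store hs _ _ _ (by omega) h3
  · exact hs

theorem shape_w3 {R C : Nat} {dg : List (List String)} {p : Int × Int}
    (hs : Shape R C dg) (h3 : 0 ≤ p.2) : Shape R C (pvW3 dg p) := by
  unfold pvW3; split
  · exact shape_store hs _ _ _ (by omega) h3
  · exact hs

theorem shape_w4 {R C : Nat} {c : Int} {dg : List (List String)} {p : Int × Int}
    (hs : Shape R C dg) (h1 : 0 ≤ p.1) (h3 : 0 ≤ p.2) : Shape R C (pvW4 c dg p) := by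
  unfold pvW4; split
  · exact shape_store hs _ _ _ h1 (by omega)
  · exact hs

theorem shape_w5 {R C : Nat} {dg : List (List String)} {p : Int × Int}
    (hs : Shape R C dg) (h1 : 0 ≤ p.1) : Shape R C (pvW5 dg p) := by
  unfold pvW5; split
  · exact shape_store hs _ _ _ h1 (by omega)
  · exact hs

theorem step_shape {R C : Nat} {r c : Int} (grid : List (List String))
    {dg : List (List String)} (hs : Shape R C dg) (p : Int × Int)
    (hp : 0 ≤ p.1 ∧ p.1 < r ∧ 0 ≤ p.2 ∧ p.2 < c) :
    Shape R C (stepA r c grid dg p) := by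
  obtain ⟨h1, h2, h3, h4⟩ := hp
  unfold stepA
  split
  · exact shape_w5 (shape_w4 (shape_w3 (shape_w2 (shape_w1 hs h1 h3) h1 h3) h3) h1 h3) h1
  · exact hs

theorem gcell_w1 {R C : Nat} {dg : List (List String)} {p : Int × Int}
    (hs : Shape R C dg) (h1 : 0 ≤ p.1) (h3 : 0 ≤ p.2)
    (i j : Nat) (hi : i < R) (hj : j < C) :
    gcell (pvW1 dg p) i j = if p.1.toNat = i ∧ p.2.toNat = j then "." else gcell dg i j :=
  gcell_store hs p.1 p.2 "." h1 h3 i j hi hj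

theorem gcell_w2 {R C : Nat} {r : Int} {dg : List (List String)} {p : Int × Int}
    (hs : Shape R C dg) (h1 : 0 ≤ p.1) (h2 : p.1 < r) (h3 : 0 ≤ p.2) (hR : R = r.toNat)
    (i j : Nat) (hi : i < R) (hj : j < C) :
    gcell (pvW2 r dg p) i j
      = if p.1.toNat + 1 = i ∧ p.2.toNat = j then "." else gcell dg i j := by
  unfold pvW2; split
  · rw [gcell_store hs _ _ _ (by omega) h3 i j hi hj]
    have ht : (p.1 + 1).toNat = p.1.toNat + 1 := by omega
    rw [ht]
  · rw [if_neg (by rintro ⟨hh, -⟩; omega)]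

theorem gcell_w3 {R C : Nat} {dg : List (List String)} {p : Int × Int}
    (hs : Shape R C dg) (h1 : 0 ≤ p.1) (h3 : 0 ≤ p.2)
    (i j : Nat) (hi : i < R) (hj : j < C) :
    gcell (pvW3 dg p) i j
      = if i + 1 = p.1.toNat ∧ p.2.toNat = j then "." else gcell dg i j := by
  unfold pvW3; split
  · rw [gcell_store hs _ _ _ (by omega) h3 i j hi hj]
    refine if_congr ?_ rfl rfl
    constructor
    · rintro ⟨hh, hy⟩; exact ⟨by omega, hy⟩
    · rintro ⟨hh, hy⟩; exact ⟨by omega, hy⟩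
  · rw [if_neg (by rintro ⟨hh, -⟩; omega)]

theorem gcell_w4 {R C : Nat} {c : Int} {dg : List (List String)} {p : Int × Int}
    (hs : Shape R C dg) (h1 : 0 ≤ p.1) (h3 : 0 ≤ p.2) (h4 : p.2 < c) (hC : C = c.toNat)
    (i j : Nat) (hi : i < R) (hj : j < C) :
    gcell (pvW4 c dg p) i j
      = if p.1.toNat = i ∧ p.2.toNat + 1 = j then "." else gcell dg i j := by
  unfold pvW4; split
  · rw [gcell_store hs _ _ _ h1 (by omega) i j hi hj]
    have ht : (p.2 + 1).toNat = p.2.toNat + 1 := by omega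
    rw [ht]
  · rw [if_neg (by rintro ⟨-, hh⟩; omega)]

theorem gcell_w5 {R C : Nat} {dg : List (List String)} {p : Int × Int}
    (hs : Shape R C dg) (h1 : 0 ≤ p.1) (h3 : 0 ≤ p.2)
    (i j : Nat) (hi : i < R) (hj : j < C) :
    gcell (pvW5 dg p) i j
      = if p.1.toNat = i ∧ j + 1 = p.2.toNat then "." else gcell dg i j := by
  unfold pvW5; split
  · rw [gcell_store hs _ _ _ h1 (by omega) i j hi hj]
    refine if_congr ?_ rfl rfl
    constructor
    · rintro ⟨hx, hh⟩; exact ⟨hx, by omega⟩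
    · rintro ⟨hx, hh⟩; exact ⟨hx, by omega⟩
  · rw [if_neg (by rintro ⟨-, hh⟩; omega)]

theorem bombN_of_test {grid : List (List String)} {x y : Int} (hx : 0 ≤ x) (hy : 0 ≤ y) :
    (PySem.List.pyGetD (PySem.List.pyGetD grid x []) y "" == "O")
      = bombN grid x.toNat y.toNat := by
  rw [gcell_pyGetD grid x y hx hy]; rfl

theorem step_gcell {R C : Nat} {r c : Int} (grid : List (List String))
    {dg : List (List String)}
    (hs : Shape R C dg) (hR : R = r.toNat) (hC : C = c.toNat) (p : Int × Int)
    (hp : 0 ≤ p.1 ∧ p.1 < r ∧ 0 ≤ p.2 ∧ p.2 < c)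
    (i j : Nat) (hi : i < R) (hj : j < C) :
    gcell (stepA r c grid dg p) i j =
      if bombN grid p.1.toNat p.2.toNat && pvAdj p.1.toNat p.2.toNat i j then "."
      else gcell dg i j := by
  obtain ⟨h1, h2, h3, h4⟩ := hp
  unfold stepA
  rw [bombN_of_test h1 h3]
  by_cases hbomb : bombN grid p.1.toNat p.2.toNat = true
  · rw [if_pos hbomb, hbomb, Bool.true_and]
    have s1 : Shape R C (pvW1 dg p) := shape_w1 hs h1 h3
    have s2 : Shape R C (pvW2 r (pvW1 dg p) p) := shape_w2 s1 h1 h3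
    have s3 : Shape R C (pvW3 (pvW2 r (pvW1 dg p) p) p) := shape_w3 s2 h3
    have s4 : Shape R C (pvW4 c (pvW3 (pvW2 r (pvW1 dg p) p) p) p) := shape_w4 s3 h1 h3
    rw [gcell_w5 s4 h1 h3 i j hi hj, gcell_w4 s3 h1 h3 h4 hC i j hi hj,
      gcell_w3 s2 h1 h3 i j hi hj, gcell_w2 s1 h1 h2 h3 hR i j hi hj,
      gcell_w1 hs h1 h3 i j hi hj]
    simp only [pvAdj, Bool.or_eq_true, Bool.and_eq_true, beq_iff_eq]
    split_ifs <;> first | rfl | (exfalso; omega)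
  · rw [if_neg hbomb]
    have hb : bombN grid p.1.toNat p.2.toNat = false := by simpa using hbomb
    rw [hb]
    simp

theorem fold_gcell {R C : Nat} {r c : Int} {grid : List (List String)}
    (hR : R = r.toNat) (hC : C = c.toNat) (L : List (Int × Int))
    (hL : ∀ p ∈ L, 0 ≤ p.1 ∧ p.1 < r ∧ 0 ≤ p.2 ∧ p.2 < c)
    (dg : List (List String)) (hs : Shape R C dg) :
    Shape R C (L.foldl (stepA r c grid) dg) ∧
      ∀ i < R, ∀ j < C, gcell (L.foldl (stepA r c grid) dg) i j =
        if hitL grid L i j then "." else gcell dg i j := by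
  induction L generalizing dg with
  | nil => exact ⟨hs, by intro i hi j hj; simp [hitL]⟩
  | cons p L ih =>
    have hp := hL p List.mem_cons_self
    have hs' := step_shape grid hs p hp
    obtain ⟨hsh, hval⟩ := ih (fun q hq => hL q (List.mem_cons_of_mem _ hq)) _ hs'
    refine ⟨hsh, fun i hi j hj => ?_⟩
    rw [List.foldl_cons] at *
    rw [hval i hi j hj, step_gcell grid hs hR hC p hp i j hi hj]
    simp only [hitL, List.any_cons]
    by_cases hA : (bombN grid p.1.toNat p.2.toNat && pvAdj p.1.toNat p.2.toNat i j) = true <;>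
      by_cases hB : (L.any fun p => bombN grid p.1.toNat p.2.toNat && pvAdj p.1.toNat p.2.toNat i j) = true <;>
      simp [hA, hB]

theorem foldl_nested {α β γ : Type} (f : γ → α → β → γ) (L1 : List α) (L2 : List β) (g : γ) :
    L1.foldl (fun acc i => L2.foldl (fun acc2 j => f acc2 i j) acc) g
      = (L1.flatMap (fun i => L2.map (fun j => (i, j)))).foldl (fun acc p => f acc p.1 p.2) g := by
  induction L1 generalizing g with
  | nil => rfl
  | cons a L1 ih => simp [List.flatMap_cons, List.foldl_append, List.foldl_map, ih]

theorem detonate_eq_fold (r c : Int) (grid : List (List String)) :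
    detonate r c grid =
      (pvPairs r c).foldl (stepA r c grid)
        ((PySem.List.pyRange 0 r 1).map (fun _ => List.replicate c.toNat "O")) := by
  unfold detonate pvPairs
  exact foldl_nested (fun dg i j => stepA r c grid dg (i, j)) _ _ _

theorem mem_pvPairs {r c : Int} {p : Int × Int} :
    p ∈ pvPairs r c ↔ 0 ≤ p.1 ∧ p.1 < r ∧ 0 ≤ p.2 ∧ p.2 < c := by
  obtain ⟨a, b⟩ := p
  simp [pvPairs, List.mem_flatMap, PySem.List.mem_pyRange_one]
  tauto

theorem pvBomb_iff {r c : Int} {grid : List (List String)} {x y : Int} :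
    pvBomb r c grid x y = true ↔
      0 ≤ x ∧ x < r ∧ 0 ≤ y ∧ y < c ∧ bombN grid x.toNat y.toNat = true := by
  unfold pvBomb
  constructor
  · intro h
    simp only [Bool.and_eq_true, decide_eq_true_eq] at h
    obtain ⟨⟨⟨⟨hx, hxr⟩, hy⟩, hyc⟩, hb⟩ := h
    refine ⟨hx, hxr, hy, hyc, ?_⟩
    rwa [gcell_pyGetD grid x y hx hy] at hb
  · rintro ⟨hx, hxr, hy, hyc, hb⟩
    simp only [Bool.and_eq_true, decide_eq_true_eq]
    exact ⟨⟨⟨⟨hx, hxr⟩, hy⟩, hyc⟩, by rwa [gcell_pyGetD grid x y hx hy]⟩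

theorem hit_iff_gather {r c : Int} {grid : List (List String)} {i j : Nat} :
    hitL grid (pvPairs r c) i j =
      (pvBomb r c grid (i : Int) (j : Int) || pvBomb r c grid ((i : Int) - 1) (j : Int)
        || pvBomb r c grid ((i : Int) + 1) (j : Int) || pvBomb r c grid (i : Int) ((j : Int) - 1)
        || pvBomb r c grid (i : Int) ((j : Int) + 1)) := by
  rw [Bool.eq_iff_iff]
  unfold hitL
  rw [List.any_eq_true]
  constructor
  · rintro ⟨⟨a, b⟩, hmem, hcond⟩
    rw [mem_pvPairs] at hmem
    obtain ⟨ha0, har, hb0, hbc⟩ := hmem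
    simp only [Bool.and_eq_true] at hcond
    obtain ⟨hbomb, hadj⟩ := hcond
    simp only [pvAdj, Bool.or_eq_true, Bool.and_eq_true, beq_iff_eq] at hadj
    simp only [Bool.or_eq_true]
    rcases hadj with (((⟨hA, hB⟩ | ⟨hA, hB⟩) | ⟨hA, hB⟩) | ⟨hA, hB⟩) | ⟨hA, hB⟩
    · refine Or.inl (Or.inl (Or.inl (Or.inl (pvBomb_iff.mpr
        ⟨by omega, by omega, by omega, by omega, ?_⟩))))
      have e1 : ((i : Int)).toNat = a.toNat := by omega
      have e2 : ((j : Int)).toNat = b.toNat := by omega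
      rw [e1, e2]; exact hbomb
    · refine Or.inl (Or.inl (Or.inl (Or.inr (pvBomb_iff.mpr
        ⟨by omega, by omega, by omega, by omega, ?_⟩))))
      have e1 : ((i : Int) - 1).toNat = a.toNat := by omega
      have e2 : ((j : Int)).toNat = b.toNat := by omega
      rw [e1, e2]; exact hbomb
    · refine Or.inl (Or.inl (Or.inr (pvBomb_iff.mpr
        ⟨by omega, by omega, by omega, by omega, ?_⟩)))
      have e1 : ((i : Int) + 1).toNat = a.toNat := by omega
      have e2 : ((j : Int)).toNat = b.toNat := by omega
      rw [e1, e2]; exact hbomb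
    · refine Or.inl (Or.inr (pvBomb_iff.mpr ⟨by omega, by omega, by omega, by omega, ?_⟩))
      have e1 : ((i : Int)).toNat = a.toNat := by omega
      have e2 : ((j : Int) - 1).toNat = b.toNat := by omega
      rw [e1, e2]; exact hbomb
    · refine Or.inr (pvBomb_iff.mpr ⟨by omega, by omega, by omega, by omega, ?_⟩)
      have e1 : ((i : Int)).toNat = a.toNat := by omega
      have e2 : ((j : Int) + 1).toNat = b.toNat := by omega
      rw [e1, e2]; exact hbomb
  · intro h
    simp only [Bool.or_eq_true] at h
    rcases h with ((((h | h) | h) | h) | h) <;>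
      obtain ⟨hx, hxr, hy, hyc, hb⟩ := pvBomb_iff.mp h
    · refine ⟨((i : Int), (j : Int)), mem_pvPairs.mpr ⟨hx, hxr, hy, hyc⟩, ?_⟩
      simp only [Bool.and_eq_true]
      refine ⟨hb, ?_⟩
      simp only [pvAdj, Bool.or_eq_true, Bool.and_eq_true, beq_iff_eq]
      omega
    · refine ⟨((i : Int) - 1, (j : Int)), mem_pvPairs.mpr ⟨hx, hxr, hy, hyc⟩, ?_⟩
      simp only [Bool.and_eq_true]
      refine ⟨hb, ?_⟩
      simp only [pvAdj, Bool.or_eq_true, Bool.and_eq_true, beq_iff_eq]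
      omega
    · refine ⟨((i : Int) + 1, (j : Int)), mem_pvPairs.mpr ⟨hx, hxr, hy, hyc⟩, ?_⟩
      simp only [Bool.and_eq_true]
      refine ⟨hb, ?_⟩
      simp only [pvAdj, Bool.or_eq_true, Bool.and_eq_true, beq_iff_eq]
      omega
    · refine ⟨((i : Int), (j : Int) - 1), mem_pvPairs.mpr ⟨hx, hxr, hy, hyc⟩, ?_⟩
      simp only [Bool.and_eq_true]
      refine ⟨hb, ?_⟩
      simp only [pvAdj, Bool.or_eq_true, Bool.and_eq_true, beq_iff_eq]
      omega
    · refine ⟨((i : Int), (j : Int) + 1), mem_pvPairs.mpr ⟨hx, hxr, hy, hyc⟩, ?_⟩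
      simp only [Bool.and_eq_true]
      refine ⟨hb, ?_⟩
      simp only [pvAdj, Bool.or_eq_true, Bool.and_eq_true, beq_iff_eq]
      omega

theorem grid_ext {R C : Nat} {g1 g2 : List (List String)}
    (h1 : Shape R C g1) (h2 : Shape R C g2)
    (h : ∀ i < R, ∀ j < C, gcell g1 i j = gcell g2 i j) : g1 = g2 := by
  obtain ⟨hl1, hr1⟩ := h1
  obtain ⟨hl2, hr2⟩ := h2
  apply List.ext_getElem (by rw [hl1, hl2])
  intro i hi1 hi2
  apply List.ext_getElem
    (by rw [hr1 _ (g1.getElem_mem hi1), hr2 _ (g2.getElem_mem hi2)])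
  intro j hj1 hj2
  have hiR : i < R := by rw [← hl1]; exact hi1
  have hjC : j < C := by rw [← hr1 _ (g1.getElem_mem hi1)]; exact hj1
  have := h i hiR j hjC
  unfold gcell at this
  rwa [List.getD_eq_getElem g1 [] hi1, List.getD_eq_getElem g2 [] hi2,
    List.getD_eq_getElem _ _ hj1, List.getD_eq_getElem _ _ hj2] at this

theorem alt_shape (r c : Int) (grid : List (List String)) :
    Shape r.toNat c.toNat (detonate_alt r c grid) := by
  unfold detonate_alt
  constructor
  · simp [PySem.List.length_pyRange_one]
  · intro row hmem
    rw [List.mem_map] at hmem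
    obtain ⟨x, -, hx⟩ := hmem
    rw [← hx]
    simp [PySem.List.length_pyRange_one]

theorem alt_gcell (r c : Int) (grid : List (List String)) (i j : Nat)
    (hi : i < r.toNat) (hj : j < c.toNat) :
    gcell (detonate_alt r c grid) i j =
      if pvBomb r c grid (i : Int) (j : Int) || pvBomb r c grid ((i : Int) - 1) (j : Int)
          || pvBomb r c grid ((i : Int) + 1) (j : Int) || pvBomb r c grid (i : Int) ((j : Int) - 1)
          || pvBomb r c grid (i : Int) ((j : Int) + 1) then "." else "O" := by
  unfold detonate_alt gcell
  have hiL : i < ((PySem.List.pyRange 0 r 1).map (fun x => (PySem.List.pyRange 0 c 1).map (fun y => (fun i j =>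
      if pvBomb r c grid i j || pvBomb r c grid (i - 1) j || pvBomb r c grid (i + 1) j
        || pvBomb r c grid i (j - 1) || pvBomb r c grid i (j + 1) then "." else "O") x y))).length := by
    simp [PySem.List.length_pyRange_one]; omega
  rw [List.getD_eq_getElem _ _ hiL, List.getElem_map]
  have hjL : j < ((PySem.List.pyRange 0 c 1).map (fun y => (fun i' j' =>
      if pvBomb r c grid i' j' || pvBomb r c grid (i' - 1) j' || pvBomb r c grid (i' + 1) j'
        || pvBomb r c grid i' (j' - 1) || pvBomb r c grid i' (j' + 1)
        then "." else "O") ((PySem.List.pyRange 0 r 1)[i]'(by simpa [PySem.List.length_pyRange_one] using hi)) y)).length := by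
    simp [PySem.List.length_pyRange_one]; omega
  rw [List.getD_eq_getElem _ _ hjL, List.getElem_map]
  have hri : (PySem.List.pyRange 0 r 1)[i]'(by simpa [PySem.List.length_pyRange_one] using hi) = (i : Int) := by
    rw [PySem.List.getElem_pyRange_one]; omega
  have hcj : (PySem.List.pyRange 0 c 1)[j]'(by simpa [PySem.List.length_pyRange_one] using hj) = (j : Int) := by
    rw [PySem.List.getElem_pyRange_one]; omega
  simp only [hri, hcj]

theorem init_shape (r c : Int) :
    Shape r.toNat c.toNat ((PySem.List.pyRange 0 r 1).map (fun _ => List.replicate c.toNat "O")) := by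
  constructor
  · simp [PySem.List.length_pyRange_one]
  · intro row hmem
    rw [List.mem_map] at hmem
    obtain ⟨x, -, hx⟩ := hmem
    simp [← hx]

theorem init_gcell (r c : Int) (i j : Nat) (hi : i < r.toNat) (hj : j < c.toNat) :
    gcell ((PySem.List.pyRange 0 r 1).map (fun _ => List.replicate c.toNat "O")) i j = "O" := by
  unfold gcell
  have hiL : i < ((PySem.List.pyRange 0 r 1).map (fun _ => List.replicate c.toNat "O")).length := by
    simp [PySem.List.length_pyRange_one]; omega
  rw [List.getD_eq_getElem _ _ hiL, List.getElem_map]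
  rw [List.getD_eq_getElem _ _ (by simpa using hj)]
  simp

-- ===== VERDICT (by name: the statement is the Claim_ definition above) =====
theorem detonate_spec : Claim_equal_detonate := by
  intro r c grid _ _
  unfold Spec_detonate
  rw [detonate_eq_fold]
  obtain ⟨hsh, hval⟩ := fold_gcell rfl rfl (pvPairs r c)
    (fun p hp => mem_pvPairs.mp hp) _ (init_shape r c)
  apply grid_ext hsh (alt_shape r c grid)
  intro i hi j hj
  rw [hval i hi j hj, alt_gcell r c grid i j hi hj, init_gcell r c i j hi hj,
    hit_iff_gather]
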